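-- pv_equiv track=rewrite | github.com/bewest/rag-nightscout-ecosystem-alignment | tools/cgmencode/exp_clinical_1551.py | _extract_runs
-- ===== SOURCE A (Python) =====
-- def _extract_runs(mask, min_length=1):
--     """Extract contiguous True runs from a boolean mask."""
--     runs = []
--     in_run = False
--     start = 0
--     for i in range(len(mask)):
--         if mask[i] and not in_run:
--             start = i
--             in_run = True
--         elif not mask[i] and in_run:
--             if i - start >= min_length:
--                 runs.append((start, i))
--             in_run = False
--     if in_run and len(mask) - start >= min_length:
--         runs.append((start, len(mask)))
--     return runs
-- ===== SOURCE B (Python) =====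
-- def _extract_runs(mask, min_length=1):
--     """Extract contiguous True runs from a boolean mask."""
--     runs = []
--     i = 0
--     n = len(mask)
--     while i < n:
--         j = i
--         while j < n and bool(mask[j]) == bool(mask[i]):
--             j += 1
--         if mask[i] and j - i >= min_length:
--             runs.append((i, j))
--         i = j
--     return runs
-- ===== Notes on version B (the rewrite author's own statement) =====
-- stated objective: alternative
-- what changed: Replaces A's in_run/start flag state machine (with a post-loop flush) by a two-pointer scan that jumps over each maximal run of equal truthiness and emits qualifying True runs directly, with no carried flag state.
import Mathlib
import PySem

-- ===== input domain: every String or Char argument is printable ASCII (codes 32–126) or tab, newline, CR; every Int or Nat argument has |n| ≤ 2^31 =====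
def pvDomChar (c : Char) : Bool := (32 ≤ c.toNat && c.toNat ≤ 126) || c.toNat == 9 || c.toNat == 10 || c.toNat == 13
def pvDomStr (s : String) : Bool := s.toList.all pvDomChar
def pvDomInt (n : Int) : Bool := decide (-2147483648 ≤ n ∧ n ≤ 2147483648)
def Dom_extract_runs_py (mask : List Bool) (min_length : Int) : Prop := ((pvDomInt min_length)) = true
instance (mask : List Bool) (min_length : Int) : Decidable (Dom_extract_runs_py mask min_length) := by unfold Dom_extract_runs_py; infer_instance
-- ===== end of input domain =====

-- B replaces A's in_run/start flag state machine by a two-pointer scan over maximal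
-- runs of equal values (objective: alternative structure, same O(n) cost).

-- ===== PORT A =====
-- loop body of A's `for i in range(len(mask))`: state = (runs, in_run, start)
def aStep (mask : List Bool) (m : Int) (st : List (Int × Int) × Bool × Int) (i : Int) :
    List (Int × Int) × Bool × Int :=
  if PySem.List.pyGetD mask i false && !st.2.1 then (st.1, true, i)
  else if !(PySem.List.pyGetD mask i false) && st.2.1 then
    ((if m ≤ i - st.2.2 then st.1 ++ [(st.2.2, i)] else st.1), false, st.2.2)
  else st

def extract_runs_py (mask : List Bool) (min_length : Int) : List (Int × Int) :=
  let st := (PySem.List.pyRange 0 (mask.length : Int) 1).foldl (aStep mask min_length) ([], false, 0)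
  if st.2.1 && decide (min_length ≤ (mask.length : Int) - st.2.2) then st.1 ++ [(st.2.2, (mask.length : Int))] else st.1

-- ===== PORT B =====
-- Source B's outer while over i: each iteration scans the maximal run of values equal to
-- mask[i] (the inner while computing j), emits (i, j) for a long-enough True run, jumps i to j.
def altGo (m : Int) : List Bool → Int → List (Int × Int)
  | [], _ => []
  | b :: t, i =>
      let j := i + 1 + ((t.takeWhile (· == b)).length : Int)
      (if b && decide (m ≤ j - i) then [(i, j)] else []) ++ altGo m (t.dropWhile (· == b)) j
  termination_by t _ => t.length
  decreasing_by simp; exact List.length_dropWhile_le _ _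

def extract_runs_py_alt (mask : List Bool) (min_length : Int) : List (Int × Int) :=
  altGo min_length mask 0

-- ===== PRECONDITION & SPEC =====
def Spec_extract_runs_py (mask : List Bool) (min_length : Int) (out : List (Int × Int)) : Prop := out = extract_runs_py_alt mask min_length
instance (mask : List Bool) (min_length : Int) (out : List (Int × Int)) : Decidable (Spec_extract_runs_py mask min_length out) := by unfold Spec_extract_runs_py; infer_instance

-- ===== CLAIM (what is proved, stated in full; the proofs are below) =====
def Claim_equal_extract_runs_py : Prop := ∀ (mask : List Bool) (min_length : Int), Dom_extract_runs_py mask min_length → Spec_extract_runs_py mask min_length (extract_runs_py mask min_length)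

-- ===== LEMMAS AND PROOFS =====

-- A's loop, rephrased as structural recursion over the list suffix (b = mask[i])
def aStep' (m : Int) (st : List (Int × Int) × Bool × Int) (i : Int) (b : Bool) :
    List (Int × Int) × Bool × Int :=
  if b && !st.2.1 then (st.1, true, i)
  else if !b && st.2.1 then
    ((if m ≤ i - st.2.2 then st.1 ++ [(st.2.2, i)] else st.1), false, st.2.2)
  else st

def loopA (m : Int) : List Bool → Int → (List (Int × Int) × Bool × Int) → (List (Int × Int) × Bool × Int)
  | [], _, st => st
  | b :: t, i, st => loopA m t (i + 1) (aStep' m st i b)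

-- A's final flush after the loop
def finishA (m n : Int) (st : List (Int × Int) × Bool × Int) : List (Int × Int) :=
  if st.2.1 && decide (m ≤ n - st.2.2) then st.1 ++ [(st.2.2, n)] else st.1

-- the whole remaining computation of A from a given state
def runA (m : Int) (t : List Bool) (i : Int) (st : List (Int × Int) × Bool × Int) : List (Int × Int) :=
  finishA m (i + (t.length : Int)) (loopA m t i st)

theorem aStep_eq (mask : List Bool) (m : Int) (st : List (Int × Int) × Bool × Int) (i : Int) :
    aStep mask m st i = aStep' m st i (PySem.List.pyGetD mask i false) := rfl

theorem runA_cons (m : Int) (b : Bool) (t : List Bool) (i : Int)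
    (st : List (Int × Int) × Bool × Int) :
    runA m (b :: t) i st = runA m t (i + 1) (aStep' m st i b) := by
  unfold runA
  rw [show ((b :: t).length : Int) = (t.length : Int) + 1 by push_cast [List.length_cons]; ring]
  rw [show i + ((t.length : Int) + 1) = (i + 1) + (t.length : Int) by ring]
  rfl

theorem bridge (mask : List Bool) (m : Int) :
    ∀ (t : List Bool) (s : Nat), mask.drop s = t →
    ∀ st, (PySem.List.pyRange (s : Int) (mask.length : Int) 1).foldl (aStep mask m) st
          = loopA m t (s : Int) st := by
  intro t
  induction t with
  | nil =>
      intro s hdrop st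
      have hlen : mask.length ≤ s := by
        by_contra h
        have := List.drop_eq_nil_iff.mp hdrop
        omega
      rw [PySem.List.pyRange_one_eq_nil (by exact_mod_cast hlen)]
      rfl
  | cons b t ih =>
      intro s hdrop st
      have hs : s < mask.length := by
        by_contra h
        have := congrArg List.length hdrop
        simp at this
        omega
      have hget : mask[s] = b := by
        have h0 : (mask.drop s)[0]? = some b := by rw [hdrop]; rfl
        rw [List.getElem?_drop] at h0
        rw [List.getElem?_eq_getElem (by omega)] at h0
        simpa using h0
      have hdrop' : mask.drop (s + 1) = t := by
        have := congrArg List.tail hdrop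
        simpa [List.tail_drop] using this
      rw [PySem.List.pyRange_one_cons (by exact_mod_cast hs)]
      rw [List.foldl_cons]
      have hpg : PySem.List.pyGetD mask (s : Int) false = b := by
        rw [PySem.List.pyGetD_natCast]
        simp [List.getD, hs, hget]
      have := ih (s + 1) hdrop' (aStep mask m st s)
      rw [show ((s : Int) + 1) = ((s + 1 : Nat) : Int) by push_cast; ring]
      rw [this]
      simp [loopA, aStep_eq, hpg]

-- skipping a leading False one element at a time equals skipping its whole run
theorem altGo_false (m : Int) (t : List Bool) (i : Int) :
    altGo m (false :: t) i = altGo m t (i + 1) := by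
  cases t with
  | nil => simp [altGo]
  | cons c t' =>
      cases c with
      | false =>
          show altGo m (false :: false :: t') i = altGo m (false :: t') (i + 1)
          rw [altGo, altGo]
          simp only [List.takeWhile_cons, List.dropWhile_cons]
          norm_num
          congr 1
          ring
      | true =>
          show altGo m (false :: true :: t') i = altGo m (true :: t') (i + 1)
          rw [altGo]
          simp

-- inside a True run started at `start`: A scans the rest of the run, emits on leaving it
theorem inrun (m : Int) : ∀ (t : List Bool) (i start : Int) (runs : List (Int × Int)),
    runA m t i (runs, true, start)
      = (let e := i + ((t.takeWhile (· == true)).length : Int)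
         let runs' := if m ≤ e - start then runs ++ [(start, e)] else runs
         match t.dropWhile (· == true) with
         | [] => runs'
         | _ :: t2 => runA m t2 (e + 1) (runs', false, start)) := by
  intro t
  induction t with
  | nil =>
      intro i start runs
      simp [runA, loopA, finishA]
  | cons b t' ih =>
      intro i start runs
      cases b with
      | true =>
          rw [runA_cons]
          have hst : aStep' m (runs, true, start) i true = (runs, true, start) := by
            simp [aStep']
          rw [hst, ih]
          simp only [List.takeWhile_cons, List.dropWhile_cons, beq_self_eq_true, if_pos,
            List.length_cons]
          generalize (List.takeWhile (fun x => x == true) t').length = k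
          rw [show i + ((k + 1 : Nat) : Int) = i + 1 + (k : Int) by push_cast; ring]
      | false =>
          rw [runA_cons]
          have hst : aStep' m (runs, true, start) i false
              = ((if m ≤ i - start then runs ++ [(start, i)] else runs), false, start) := by
            simp [aStep']
          rw [hst]
          simp only [List.takeWhile_cons, List.dropWhile_cons]
          norm_num

-- main invariant: from a not-in-run state, A's remaining computation appends B's output
theorem main_inv (m : Int) : ∀ (n : Nat) (t : List Bool), t.length ≤ n →
    ∀ (i start : Int) (runs : List (Int × Int)),
    runA m t i (runs, false, start) = runs ++ altGo m t i := by
  intro n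
  induction n with
  | zero =>
      intro t ht i start runs
      have : t = [] := List.eq_nil_of_length_eq_zero (by omega)
      subst this
      simp [runA, loopA, finishA, altGo]
  | succ n ih =>
      intro t ht i start runs
      cases t with
      | nil => simp [runA, loopA, finishA, altGo]
      | cons b t' =>
          cases b with
          | false =>
              rw [runA_cons]
              have hst : aStep' m (runs, false, start) i false = (runs, false, start) := by
                simp [aStep']
              rw [hst, ih t' (by simp at ht; omega) (i + 1) start runs, altGo_false]
          | true =>
              rw [runA_cons]
              have hst : aStep' m (runs, false, start) i true = (runs, true, i) := by
                simp [aStep']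
              rw [hst, inrun]
              rw [altGo]
              simp only [beq_true]
              set k : Int := ((t'.takeWhile (fun x => x)).length : Int) with hk
              cases hdw : t'.dropWhile (fun x => x) with
              | nil =>
                  rw [show ((i + 1) + k) = (i + 1 + k) by ring]
                  by_cases h : m ≤ i + 1 + k - i <;> simp [altGo, h]
              | cons d t2 =>
                  simp only [hdw]
                  have ht2 : t2.length ≤ n := by
                    have h1 := List.length_dropWhile_le (fun x => x) t'
                    rw [hdw] at h1
                    simp at h1 ht
                    omega
                  have hd : d = false := by
                    have h1 := List.head_dropWhile_not (p := fun x => x) (l := t')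
                      (by simp [hdw])
                    simp only [hdw, List.head_cons] at h1
                    exact h1
                  subst hd
                  rw [show ((i + 1) + k) = (i + 1 + k) by ring]
                  rw [ih t2 ht2 (i + 1 + k + 1) i _, altGo_false]
                  by_cases h : m ≤ i + 1 + k - i <;> simp [h, List.append_assoc]

theorem runA_spec (mask : List Bool) (m : Int) :
    extract_runs_py mask m = runA m mask 0 ([], false, 0) := by
  have hb := bridge mask m mask 0 (by simp) ([], false, 0)
  simp only [Nat.cast_zero] at hb
  unfold extract_runs_py runA finishA
  rw [hb]
  simp

theorem extract_runs_py_eq (mask : List Bool) (m : Int) :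
    extract_runs_py mask m = extract_runs_py_alt mask m := by
  rw [runA_spec, main_inv m mask.length mask le_rfl 0 0 []]
  rfl

-- ===== VERDICT (by name: the statement is the Claim_ definition above) =====
theorem extract_runs_py_spec : Claim_equal_extract_runs_py := by
  intro mask m _
  unfold Spec_extract_runs_py
  exact extract_runs_py_eq mask m
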